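-- pv_equiv track=rewrite | github.com/lvcc2018/Megatron-LM | megatron/data/gpt_dataset.py | _num_epochs
-- ===== SOURCE A (Python) =====
-- def _num_epochs(tokens_per_epoch, seq_length, num_samples):
--     """Based on number of samples and sequence lenght, calculate how many
--     epochs will be needed."""
--     num_epochs = 0
--     total_tokens = 0
--     while True:
--         num_epochs += 1
--         total_tokens += tokens_per_epoch
--         # -1 is because we need to retrieve seq_length + 1 token each time
--         # but the last token will overlap with the first token of the next
--         # sample except for the last sample.
--         if ((total_tokens - 1) // seq_length) >= num_samples:
--             return num_epochs
-- ===== SOURCE B (Python) =====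
-- def _num_epochs(tokens_per_epoch, seq_length, num_samples):
--     # Closed form: smallest k >= 1 with k*tokens_per_epoch >= num_samples*seq_length + 1,
--     # i.e. ceiling division, computed without a loop.
--     needed = num_samples * seq_length + 1
--     return max(1, -(-needed // tokens_per_epoch))
-- ===== Notes on version B (the rewrite author's own statement) =====
-- stated objective: faster
-- what changed: Replaces the epoch-counting while-loop by the closed-form ceiling division max(1, ceil((num_samples*seq_length+1)/tokens_per_epoch)).
-- outside the precondition, e.g. on _num_epochs(-5, 1, -10): A returns 1, B returns 2; on _num_epochs(5, 0, 3): A raises ZeroDivisionError, B returns 1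
import Mathlib
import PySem

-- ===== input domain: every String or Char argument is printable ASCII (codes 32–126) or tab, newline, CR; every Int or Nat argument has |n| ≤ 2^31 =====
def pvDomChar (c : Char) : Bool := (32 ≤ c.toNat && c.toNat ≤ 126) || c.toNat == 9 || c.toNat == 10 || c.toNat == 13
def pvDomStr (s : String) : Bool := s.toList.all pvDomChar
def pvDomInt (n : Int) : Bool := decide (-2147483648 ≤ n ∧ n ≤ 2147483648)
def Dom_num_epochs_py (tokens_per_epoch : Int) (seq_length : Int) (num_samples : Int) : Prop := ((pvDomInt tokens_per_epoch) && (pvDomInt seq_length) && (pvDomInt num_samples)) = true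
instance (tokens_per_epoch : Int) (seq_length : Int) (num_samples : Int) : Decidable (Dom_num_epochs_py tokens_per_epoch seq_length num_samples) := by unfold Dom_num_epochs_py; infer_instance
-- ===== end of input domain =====

-- B replaces A's epoch-counting while-loop by the closed-form ceiling division (faster: O(1) vs O(num_epochs)).


-- ===== PORT A =====
-- A's `while True` loop, transliterated with a fuel bound that only makes the
-- recursion total; on Pre_ the fuel is never exhausted (proved below).
def numEpochsLoop (tokens_per_epoch seq_length num_samples : Int)
    (num_epochs total_tokens : Int) : Nat → Int
  | 0 => num_epochs + 1
  | fuel + 1 =>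
      let num_epochs := num_epochs + 1
      let total_tokens := total_tokens + tokens_per_epoch
      if PySem.Int.floordiv (total_tokens - 1) seq_length ≥ num_samples then
        num_epochs
      else
        numEpochsLoop tokens_per_epoch seq_length num_samples num_epochs total_tokens fuel

def num_epochs_py (tokens_per_epoch : Int) (seq_length : Int) (num_samples : Int) : Int :=
  numEpochsLoop tokens_per_epoch seq_length num_samples 0 0
    ((num_samples * seq_length + 1).natAbs + 2)

-- ===== PORT B =====
def num_epochs_py_alt (tokens_per_epoch : Int) (seq_length : Int) (num_samples : Int) : Int :=
  let needed := num_samples * seq_length + 1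
  max 1 (-(PySem.Int.floordiv (-needed) tokens_per_epoch))

-- ===== PRECONDITION & SPEC =====
-- Pre_ excludes nonpositive tokens_per_epoch or seq_length: there A raises
-- ZeroDivisionError (seq_length = 0), loops forever, or returns 1 only as a
-- degenerate first-iteration artefact of a domain the function is not meant for.
def Pre_num_epochs_py (tokens_per_epoch : Int) (seq_length : Int) (num_samples : Int) : Prop :=
  1 ≤ tokens_per_epoch ∧ 1 ≤ seq_length
instance (tokens_per_epoch : Int) (seq_length : Int) (num_samples : Int) : Decidable (Pre_num_epochs_py tokens_per_epoch seq_length num_samples) := by unfold Pre_num_epochs_py; infer_instance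
def pvWitness_num_epochs_py : Int × Int × Int := (10, 4, 7)

def Spec_num_epochs_py (tokens_per_epoch : Int) (seq_length : Int) (num_samples : Int) (out : Int) : Prop := out = num_epochs_py_alt tokens_per_epoch seq_length num_samples
instance (tokens_per_epoch : Int) (seq_length : Int) (num_samples : Int) (out : Int) : Decidable (Spec_num_epochs_py tokens_per_epoch seq_length num_samples out) := by unfold Spec_num_epochs_py; infer_instance

-- ===== CLAIM (what is proved, stated in full; the proofs are below) =====
def Claim_equal_num_epochs_py : Prop := ∀ (tokens_per_epoch : Int) (seq_length : Int) (num_samples : Int), Dom_num_epochs_py tokens_per_epoch seq_length num_samples → Pre_num_epochs_py tokens_per_epoch seq_length num_samples → Spec_num_epochs_py tokens_per_epoch seq_length num_samples (num_epochs_py tokens_per_epoch seq_length num_samples)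

-- ===== LEMMAS AND PROOFS =====

-- The loop, started at step k with total k*T and enough fuel, returns
-- R = max 1 (ceil((N*S+1)/T)).
theorem numEpochsLoop_eq (T S N : Int) (hT : 1 ≤ T) (hS : 1 ≤ S)
    (k : Int) (hk : 0 ≤ k)
    (hkR : k < max 1 (-(PySem.Int.floordiv (-(N * S + 1)) T)))
    (fuel : Nat)
    (hfuel : (max 1 (-(PySem.Int.floordiv (-(N * S + 1)) T)) - k) ≤ fuel) :
    numEpochsLoop T S N k (k * T) fuel
      = max 1 (-(PySem.Int.floordiv (-(N * S + 1)) T)) := by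
  induction fuel generalizing k with
  | zero => omega
  | succ f ih =>
    set R := max 1 (-(PySem.Int.floordiv (-(N * S + 1)) T)) with hR
    have hceil : ∀ q : Int, -(PySem.Int.floordiv (-(N * S + 1)) T) = q ↔
        (q - 1) * T < N * S + 1 ∧ N * S + 1 ≤ q * T :=
      fun q => PySem.Int.neg_floordiv_neg_eq_iff_of_pos (by omega)
    have hC : -(PySem.Int.floordiv (-(N * S + 1)) T) = -(PySem.Int.floordiv (-(N * S + 1)) T) := rfl
    have hCb := (hceil _).mp hC
    -- the loop's test at step k+1: (k*T + T - 1) // S ≥ N ↔ (k+1)*T ≥ N*S + 1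
    have htest : (N ≤ PySem.Int.floordiv (k * T + T - 1) S) ↔ N * S + 1 ≤ (k + 1) * T := by
      rw [PySem.Int.le_floordiv_iff_mul_le (by omega)]
      constructor <;> intro h <;> nlinarith
    simp only [numEpochsLoop, ge_iff_le]
    split_ifs with h
    · -- returned: k+1 ≥ ceil, and k+1 ≤ R since k < R, so k+1 = R
      have h1 : N * S + 1 ≤ (k + 1) * T := htest.mp (by
        have : k * T + T = (k + 1) * T := by ring
        simpa [this] using h)
      -- k+1 ≥ the ceiling value
      have h2 : -(PySem.Int.floordiv (-(N * S + 1)) T) ≤ k + 1 := by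
        by_contra hlt
        push Not at hlt
        nlinarith [hCb.1, hCb.2]
      omega
    · -- not returned: k+1 < R, recurse
      have h1 : ¬ (N * S + 1 ≤ (k + 1) * T) := fun hx => h (htest.mpr hx)
      have h2 : k + 1 < -(PySem.Int.floordiv (-(N * S + 1)) T) := by
        by_contra hge
        push Not at hge
        exact h1 (by nlinarith [hCb.2])
      have hrec := ih (k + 1) (by omega) (by omega) (by omega)
      have : k * T + T = (k + 1) * T := by ring
      rw [this]
      exact hrec

theorem num_epochs_py_spec : Claim_equal_num_epochs_py := by
  intro T S N hDom hPre
  obtain ⟨hT, hS⟩ := hPre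
  unfold Spec_num_epochs_py num_epochs_py num_epochs_py_alt
  have hfuel : (max 1 (-(PySem.Int.floordiv (-(N * S + 1)) T)) - 0)
      ≤ ((N * S + 1).natAbs + 2 : Nat) := by
    have hceil := (PySem.Int.neg_floordiv_neg_eq_iff_of_pos (a := N * S + 1) (b := T)
      (q := -(PySem.Int.floordiv (-(N * S + 1)) T)) (by omega)).mp rfl
    have habs : (N * S + 1) ≤ ((N * S + 1).natAbs : Int) := Int.le_natAbs
    have h1 : -(PySem.Int.floordiv (-(N * S + 1)) T) ≤ ((N * S + 1).natAbs : Int) + 1 := by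
      nlinarith [hceil.1, hceil.2]
    have hgoal : max 1 (-(PySem.Int.floordiv (-(N * S + 1)) T))
        ≤ ((N * S + 1).natAbs : Int) + 2 := max_le (by omega) (by omega)
    simpa using hgoal
  have := numEpochsLoop_eq T S N hT hS 0 le_rfl
    (lt_max_of_lt_left (by omega)) ((N * S + 1).natAbs + 2) hfuel
  simpa using this
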